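/-
  SEGMENT R1 OF `start_decoder` (0x1158f8 – 0x11597f: the start of the residue section, stb_vorbis_fixed.c 4039 – 4043; 30
  instructions, 4 contract calls, 3 check sites) SPLIT AT THE RETURNS OF get_bits, setup_malloc AND memset: the assertions at the three
  cut points, the claims of the four children, and the composition `SegR1.of_parts` (pure logic: `ReachVia.trans`; no machine step).

      R1a  0x1158f8–0x115900, returns into 0x115905 (cut231)   `get_bits(f, 6)`
                                                               exit: AtR1a (the point `SecPt … 6 6 7 A.1 A` at cut231 ∧ rax < 64)
      R1b  0x115905–0x115925, returns into 0x11592a (cut232)   `f->residue_count = z + 1` (checked store4 at f + 140H),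
                                                               `setup_malloc(f, (z + 1) << 5)`
                                                               exit: AtR1b (the point for the ghost AFTER the call ∧ `AllocRet` ∧ residue_count)
      R1c  0x11592a–0x115952 + 0x115957–0x115976               `f->residue_config = rax` (checked store8 at f + 1C8H); NULL: `error(f, 3)`
           returns into 0x11597b (cut234)                      and `jmp 113b22` (exit AtERR, eax = 0, `Failed`); else the checked load4 of
                                                               `residue_count` and `memset(residue_config, 0, 32·rc)`
                                                               exit: AtERR ∨ AtR1c (the point at cut234 ∧ the new block ∧ its bytes 0)
      R1d  0x11597b–0x11597f                                   `r14d = dword [R + 24H]` (= Z24 = 0): the head of loop 4043 with i = 0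
                                                               exit: AtR2 0

  WHY FOUR AND NOT THREE (the analysis proposed a, b, c): the last piece would hold both arms after the NULL test AND the
  construction of `ResTrans` / `ResidueZeroFrom` for the loop head; the cut at memset's return (an existing label) separates the
  machine part (two more contract calls, two check sites, the carry over memset's footprint: R1c) from the pure logic of the
  hand-over to R2 (R1d: two instructions, `ResTrans` with `i = 0`, `ResidueZeroFrom.of_bytes`). The worker's cut233 (the return of
  `error`, one `jmp` before the epilogue) is NOT made a cut: `error`'s return is two lines of carry inside R1c.

  WHAT IS LIVE AT THE CUTS (read off c/vorbis_f.dis 1158f8 … 115982):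
      0x115905 (cut231)  reads eax (`lea r13d, [rax + 1]`: get_bits(6)'s result, < 64), rbp (= f), rsp. r13 is written here, dead before.
      0x11592a (cut232)  reads rax (`mov r13, rax`: setup_malloc's result), rbp, rsp; `residue_count` is re-read FROM MEMORY at 0x115963.
      0x11597b (cut234)  reads `[rsp + 24H]` (Z24, a field of `Mid`'s `consts`), rbp (R2 reads it), rsp. rax, r13 are dead (R2 reloads
                         `residue_config` from memory: 0x1159f8 ff.).
  All three labels exist in Vorbis/Labels.lean (cut231 = ret362, cut232 = ret364, cut234 = ret368): nothing for `AT`.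

  THE CARRY LEMMAS the children use are in Vorbis/Spec/StartDecoderMid.lean (`SecPt.carry`, `SecPt.alloc_call`, `SecPt.alloc_fail_small`,
  `Mid.carry`, `FInv.carry`); hints for the workers: farm/hints/start_decoder.R1.md.
-/
import Vorbis.Spec.StartDecoderMid
namespace Vorbis.Spec.StartDecoder
open X86 X86.User Asan

/-! ### The assertions at the cut points -/

/-- **cut231 (0x115905), the return of `get_bits(f, 6)`**: the point of the residue section's start — `Frame` at cut231, `Hand`,
`Mid g 6 6 7` (SD.6's groups over the blocks of the current arena `A.1`; the zero rest from `mapping_count` on: `residue_count` is about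
to be assigned), `rbp = f` — and the reader's result in rax. -/
structure BodyR1a (u₀ : State) (g : Ghost) (A : Arena × List Obj) (v : State) : Prop where
  /-- the point at cut231, configuration snapshot = the current arena -/
  pt : SecPt u₀ g L.start_decoder.cut231 6 6 7 A.1 A v
  /-- `z = get_bits(f, 6)`: six bits (read 0x115905 `lea r13d, [rax + 1]`; `residue_count = z + 1 ∈ [1, 64]`: R1) -/
  rax : (v.reg .rax).toNat < 64

/-- `AtR1a u₀ g v`: the exit assertion of `start_decoder.R1a`, the entry assertion of `start_decoder.R1b`. -/
def AtR1a (u₀ : State) (g : Ghost) (v : State) : Prop := ∃ A, BodyR1a u₀ g A v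

/-- **cut232 (0x11592a), the return of `setup_malloc(f, 32·rc)`**: `A` = the ghost BEFORE the call (its arena `A.1` = the snapshot
`A6` of the residue section), `A'` = the ghost after it (`alloc`: the same and rax = 0, or grown by the block in rax, allocated since
`A.1`); the point holds for `A'` with the snapshot `A.1`; `residue_count = rc ∈ [1, 64]` is in memory (stored 0x115915, re-read
0x115963). -/
structure BodyR1b (u₀ : State) (g : Ghost) (A A' : Arena × List Obj) (rc : Nat) (v : State) : Prop where
  /-- the point at cut232 for the ghost after the call; the configuration snapshot is the arena before it -/
  pt : SecPt u₀ g L.start_decoder.cut232 6 6 7 A.1 A' v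
  /-- rax and the new ghost: NULL and unchanged, or the new block `⟨B + S + 32, 32·rc⟩`, `Since A.1 A'.1` -/
  alloc : AllocRet A A' (32 * rc) v
  /-- `f->residue_count = rc` (stored 0x115915) -/
  count : stb_vorbis.residue_count v.mem g.f = (rc : Int)
  /-- R1, lower bound -/
  rc_lo : 1 ≤ rc
  /-- R1, upper bound (`get_bits(6) + 1`) -/
  rc_hi : rc ≤ 64

/-- `AtR1b u₀ g v`: the exit assertion of `start_decoder.R1b`, the entry assertion of `start_decoder.R1c`. -/
def AtR1b (u₀ : State) (g : Ghost) (v : State) : Prop := ∃ A A' rc, BodyR1b u₀ g A A' rc v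

/-- **cut234 (0x11597b), the return of `memset(f->residue_config, 0, 32·rc)`** (the success arm): `A6` = the arena at SD.6 (the
snapshot), `A` = the ghost with the `residue_config` block; the point at cut234; `residue_count = rc ∈ [1, 64]`; `residue_config` (stored
0x115939, non-NULL) is a block of `32·rc` bytes allocated since `A6` (R2 with its age), and all its bytes are 0 (the memset: RES(0)'s
zero part, `ResidueZeroFrom.of_bytes`). -/
structure BodyR1c (u₀ : State) (g : Ghost) (A6 : Arena) (A : Arena × List Obj) (rc : Nat) (v : State) : Prop where
  /-- the point at cut234; the configuration snapshot is the arena at SD.6 -/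
  pt : SecPt u₀ g L.start_decoder.cut234 6 6 7 A6 A v
  /-- `f->residue_count = rc` -/
  count : stb_vorbis.residue_count v.mem g.f = (rc : Int)
  /-- R1, lower bound -/
  rc_lo : 1 ≤ rc
  /-- R1, upper bound -/
  rc_hi : rc ≤ 64
  /-- R2 with its age: the `residue_config` block was allocated since the snapshot -/
  since : Since A6 A.1 ⟨stb_vorbis.residue_config v.mem g.f, 32 * rc⟩
  /-- the memset of line 4042: every byte of the block is 0 -/
  zero : ∀ j, j < 32 * rc → v.mem.u8 (stb_vorbis.residue_config v.mem g.f + j) = 0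

/-- `AtR1c u₀ g v`: an exit assertion of `start_decoder.R1c`, the entry assertion of `start_decoder.R1d`. -/
def AtR1c (u₀ : State) (g : Ghost) (v : State) : Prop := ∃ A6 A rc, BodyR1c u₀ g A6 A rc v

/-! ### The claims of the children -/

/-- **Segment `start_decoder.R1a`** (0x1158f8 – 0x115900): `get_bits(f, 6)`; exit at its return with the point `Mid g 6 6 7` and
rax < 64. -/
def SegR1a (Lay : Layout) (μ : Microarch) (u₀ : State) : Prop :=
  ∀ (g : Ghost) (v : State), AtR1 u₀ g v → ReachVia Lay μ WayInv v (fun w => AtR1a u₀ g w)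

/-- **Segment `start_decoder.R1b`** (0x115905 – 0x115925): `f->residue_count = z + 1` (checked store4), `setup_malloc(f, 32·rc)`; exit
at its return with the point for the ghost after the call and `AllocRet`. -/
def SegR1b (Lay : Layout) (μ : Microarch) (u₀ : State) : Prop :=
  ∀ (g : Ghost) (v : State), AtR1a u₀ g v → ReachVia Lay μ WayInv v (fun w => AtR1b u₀ g w)

/-- **Segment `start_decoder.R1c`** (0x11592a – 0x115952, 0x115957 – 0x115976): `f->residue_config = rax` (checked store8); NULL:
`error(f, VORBIS_outofmem)`, `jmp` to the epilogue (`AtERR`, eax = 0, `Failed`); else the checked load of `residue_count` and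
`memset(residue_config, 0, 32·rc)`; exit at its return. -/
def SegR1c (Lay : Layout) (μ : Microarch) (u₀ : State) : Prop :=
  ∀ (g : Ghost) (v : State), AtR1b u₀ g v → ReachVia Lay μ WayInv v (fun w => AtR1c u₀ g w ∨ AtERR u₀ g w)

/-- **Segment `start_decoder.R1d`** (0x11597b – 0x11597f): `r14d = dword [R + 24H] = 0`: the head of loop 4043 with `i = 0`
(`ResTrans` with no finished record, `ResidueZeroFrom … 0` from the zero bytes). -/
def SegR1d (Lay : Layout) (μ : Microarch) (u₀ : State) : Prop :=
  ∀ (g : Ghost) (v : State), AtR1c u₀ g v → ReachVia Lay μ WayInv v (fun w => AtR2 u₀ g 0 w)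

/-! ### The composition -/

/-- **THE COMPOSITION of the split of segment R1**: a → b → c → (d ∨ the epilogue). Pure logic: no machine step. -/
theorem SegR1.of_parts {Lay : Layout} {μ : Microarch} {u₀ : State}
    (ha : SegR1a Lay μ u₀) (hb : SegR1b Lay μ u₀) (hc : SegR1c Lay μ u₀) (hd : SegR1d Lay μ u₀) : SegR1 Lay μ u₀ := by
  intro g v hv
  refine (ha g v hv).trans ?_
  intro w1 h1
  refine (hb g w1 h1).trans ?_
  intro w2 h2
  refine (hc g w2 h2).trans ?_
  intro w3 h3
  rcases h3 with h3c | herr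
  · exact (hd g w3 h3c).mono (fun _ hx => Or.inl hx)
  · exact ReachVia.done (Or.inr herr)

end Vorbis.Spec.StartDecoder
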